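-- pv_equiv track=rewrite | github.com/HamanakaKeigo/analysis-feature | src/pic_feature.py | save_intI
-- ===== SOURCE A (Python) =====
-- def save_intI(Size=[]):
--     feature=[]
--     in_count=0
--     in_pre=0
--     in_feature=[]
--     out_count=0
--     out_pre=0
--     out_feature=[]
--
--     for i in range(0,len(Size)):
--         if in_count>=300 and out_count>=300:
--             break
--
--         if Size[i]>0:
--             if(out_count<300):
--                 out_count+=1
--                 out_feature.append(i-out_pre)
--                 out_pre=i
--         elif Size[i]<0:
--             if(in_count<300):
--                 in_count+=1
--                 in_feature.append(i-in_pre)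
--                 in_pre=i
--
--     for i in range(in_count,300):
--         in_feature.append(0)
--     for i in range(out_count,300):
--         out_feature.append(0)
--
--     feature.extend(out_feature)
--     feature.extend(in_feature)
--     return feature
-- ===== SOURCE B (Python) =====
-- def save_intI(Size=[]):
--     out_idx = [i for i, s in enumerate(Size) if s > 0][:300]
--     in_idx = [i for i, s in enumerate(Size) if s < 0][:300]
--
--     def gaps(idx):
--         prev = 0
--         g = []
--         for i in idx:
--             g.append(i - prev)
--             prev = i
--         return g
--
--     return (gaps(out_idx) + [0] * (300 - len(out_idx))
--             + gaps(in_idx) + [0] * (300 - len(in_idx)))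
-- ===== Notes on version B (the rewrite author's own statement) =====
-- stated objective: simpler
-- what changed: B replaces A's single interleaved indexed loop with break and mutable per-bucket counters/prev state by two declarative phases: collect the (up to 300) positive and negative index lists, then turn each into consecutive differences and pad with zeros.
import Mathlib
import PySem

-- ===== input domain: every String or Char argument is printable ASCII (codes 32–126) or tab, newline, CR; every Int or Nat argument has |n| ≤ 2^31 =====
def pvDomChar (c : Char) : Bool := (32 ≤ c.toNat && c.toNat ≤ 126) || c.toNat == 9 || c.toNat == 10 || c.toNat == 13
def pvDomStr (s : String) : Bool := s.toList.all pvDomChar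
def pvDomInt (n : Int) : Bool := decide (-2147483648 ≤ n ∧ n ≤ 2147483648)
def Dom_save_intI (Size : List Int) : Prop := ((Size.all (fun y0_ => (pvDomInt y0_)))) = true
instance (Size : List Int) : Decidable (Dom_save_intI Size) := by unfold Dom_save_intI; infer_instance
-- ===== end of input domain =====

-- B changes the decomposition (collect index lists, then difference and pad); same O(n) cost.
-- ===== PORT A =====
-- the indexed for-loop with break, as structural recursion on the index
def save_intI_loop (Size : List Int) (i : Nat) (ic ip : Int) (inf : List Int)
    (oc op : Int) (outf : List Int) : Int × List Int × Int × List Int :=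
  if h : i < Size.length then
    if ic ≥ 300 ∧ oc ≥ 300 then (ic, inf, oc, outf)   -- break: loop state is final
    else
      if Size[i] > 0 then
        if oc < 300 then
          save_intI_loop Size (i+1) ic ip inf (oc+1) (i : Int) (outf ++ [(i : Int) - op])
        else save_intI_loop Size (i+1) ic ip inf oc op outf
      else if Size[i] < 0 then
        if ic < 300 then
          save_intI_loop Size (i+1) (ic+1) (i : Int) (inf ++ [(i : Int) - ip]) oc op outf
        else save_intI_loop Size (i+1) ic ip inf oc op outf
      else save_intI_loop Size (i+1) ic ip inf oc op outf
  else (ic, inf, oc, outf)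
termination_by Size.length - i
decreasing_by all_goals omega

def save_intI (Size : List Int) : List Int :=
  let st := save_intI_loop Size 0 0 0 [] 0 0 []
  let in_count := st.1
  let in_feature := st.2.1
  let out_count := st.2.2.1
  let out_feature := st.2.2.2
  let in_feature := (PySem.List.pyRange in_count 300 1).foldl (fun acc _ => acc ++ [(0:Int)]) in_feature
  let out_feature := (PySem.List.pyRange out_count 300 1).foldl (fun acc _ => acc ++ [(0:Int)]) out_feature
  out_feature ++ in_feature

-- ===== PORT B =====
-- consecutive differences with prev starting at 0
def pvGaps : List Int → Int → List Int
  | [], _ => []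
  | i :: rest, prev => (i - prev) :: pvGaps rest i

def save_intI_alt (Size : List Int) : List Int :=
  let out_idx := (((PySem.List.enumerate Size 0).filter (fun p => p.2 > 0)).map (fun p => p.1)).take 300
  let in_idx := (((PySem.List.enumerate Size 0).filter (fun p => p.2 < 0)).map (fun p => p.1)).take 300
  pvGaps out_idx 0 ++ List.replicate (300 - out_idx.length) 0
    ++ pvGaps in_idx 0 ++ List.replicate (300 - in_idx.length) 0

-- ===== PRECONDITION & SPEC =====
def Spec_save_intI (Size : List Int) (out : List Int) : Prop := out = save_intI_alt Size
instance (Size : List Int) (out : List Int) : Decidable (Spec_save_intI Size out) := by unfold Spec_save_intI; infer_instance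

-- ===== CLAIM (what is proved, stated in full; the proofs are below) =====
def Claim_equal_save_intI : Prop := ∀ (Size : List Int), Dom_save_intI Size → Spec_save_intI Size (save_intI Size)

-- ===== LEMMAS AND PROOFS =====
-- indices (as Ints, starting from offset k) of elements satisfying pred
def pvSelIdx (pred : Int → Bool) : List Int → Int → List Int
  | [], _ => []
  | x :: xs, k => if pred x then k :: pvSelIdx pred xs (k+1) else pvSelIdx pred xs (k+1)

theorem pvSelIdx_enumerate (pred : Int → Bool) (xs : List Int) : ∀ (s : Int),
    (((PySem.List.enumerate xs s).filter (fun p => pred p.2)).map (fun p => p.1)) = pvSelIdx pred xs s := by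
  induction xs with
  | nil => intro s; simp [PySem.List.enumerate_nil, pvSelIdx]
  | cons x xs ih =>
    intro s
    rw [PySem.List.enumerate_cons]
    by_cases h : pred x = true <;> simp [pvSelIdx, h, List.filter, ih]

theorem pvPad_foldl (inf : List Int) (l : List Int) :
    l.foldl (fun acc _ => acc ++ [(0:Int)]) inf = inf ++ List.replicate l.length 0 := by
  induction l generalizing inf with
  | nil => simp
  | cons x xs ih => rw [List.foldl_cons, ih]; simp [List.replicate_succ]

theorem save_intI_loop_spec (Size : List Int) : ∀ (n i : Nat), Size.length - i = n →
    ∀ (ic ip : Int) (inf : List Int) (oc op : Int) (outf : List Int),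
    0 ≤ ic → ic ≤ 300 → 0 ≤ oc → oc ≤ 300 →
    save_intI_loop Size i ic ip inf oc op outf =
      (ic + (((pvSelIdx (fun s => decide (s < 0)) (Size.drop i) i).take (300 - ic).toNat).length : Int),
       inf ++ pvGaps ((pvSelIdx (fun s => decide (s < 0)) (Size.drop i) i).take (300 - ic).toNat) ip,
       oc + (((pvSelIdx (fun s => decide (0 < s)) (Size.drop i) i).take (300 - oc).toNat).length : Int),
       outf ++ pvGaps ((pvSelIdx (fun s => decide (0 < s)) (Size.drop i) i).take (300 - oc).toNat) op) := by
  intro n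
  induction n with
  | zero =>
    intro i hi ic ip inf oc op outf h1 h2 h3 h4
    have hge : ¬ i < Size.length := by omega
    rw [save_intI_loop]
    simp [hge, List.drop_eq_nil_of_le (by omega : Size.length ≤ i), pvSelIdx, pvGaps]
  | succ n ih =>
    intro i hi ic ip inf oc op outf h1 h2 h3 h4
    have hlt : i < Size.length := by omega
    have hdrop : Size.drop i = Size[i] :: Size.drop (i+1) := List.drop_eq_getElem_cons hlt
    rw [save_intI_loop]
    simp only [hlt, dif_pos, hdrop]
    by_cases hbrk : ic ≥ 300 ∧ oc ≥ 300
    · -- break: both takes are empty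
      have hic : ic = 300 := by omega
      have hoc : oc = 300 := by omega
      simp [hic, hoc, pvGaps]
    · rw [if_neg hbrk]
      by_cases hpos : Size[i] > 0
      · rw [if_pos hpos]
        have hsel : pvSelIdx (fun s => decide (0 < s)) (Size[i] :: Size.drop (i+1)) i
            = (i : Int) :: pvSelIdx (fun s => decide (0 < s)) (Size.drop (i+1)) (i+1) := by
          simp [pvSelIdx, hpos]
        have hseln : pvSelIdx (fun s => decide (s < 0)) (Size[i] :: Size.drop (i+1)) i
            = pvSelIdx (fun s => decide (s < 0)) (Size.drop (i+1)) (i+1) := by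
          simp [pvSelIdx]; omega
        rw [hsel, hseln]
        by_cases hcap : oc < 300
        · rw [if_pos hcap]
          rw [ih (i+1) (by omega) ic ip inf (oc+1) (i : Int) (outf ++ [(i : Int) - op]) h1 h2 (by omega) (by omega)]
          have htk : (300 - oc).toNat = (300 - (oc+1)).toNat + 1 := by omega
          rw [htk, List.take_succ_cons]
          push_cast
          simp [pvGaps]
          omega
        · rw [if_neg hcap]
          have hoc : oc = 300 := by omega
          rw [ih (i+1) (by omega) ic ip inf oc op outf h1 h2 h3 h4]
          simp [hoc, pvGaps]
      · rw [if_neg hpos]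
        by_cases hneg : Size[i] < 0
        · rw [if_pos hneg]
          have hsel : pvSelIdx (fun s => decide (s < 0)) (Size[i] :: Size.drop (i+1)) i
              = (i : Int) :: pvSelIdx (fun s => decide (s < 0)) (Size.drop (i+1)) (i+1) := by
            simp [pvSelIdx, hneg]
          have hselp : pvSelIdx (fun s => decide (0 < s)) (Size[i] :: Size.drop (i+1)) i
              = pvSelIdx (fun s => decide (0 < s)) (Size.drop (i+1)) (i+1) := by
            simp [pvSelIdx]; omega
          rw [hsel, hselp]
          by_cases hcap : ic < 300
          · rw [if_pos hcap]
            rw [ih (i+1) (by omega) (ic+1) (i : Int) (inf ++ [(i : Int) - ip]) oc op outf (by omega) (by omega) h3 h4]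
            have htk : (300 - ic).toNat = (300 - (ic+1)).toNat + 1 := by omega
            rw [htk, List.take_succ_cons]
            push_cast
            simp [pvGaps]
            omega
          · rw [if_neg hcap]
            have hic : ic = 300 := by omega
            rw [ih (i+1) (by omega) ic ip inf oc op outf h1 h2 h3 h4]
            simp [hic, pvGaps]
        · rw [if_neg hneg]
          have hz : Size[i] = 0 := by omega
          have hselp : pvSelIdx (fun s => decide (0 < s)) (Size[i] :: Size.drop (i+1)) i
              = pvSelIdx (fun s => decide (0 < s)) (Size.drop (i+1)) (i+1) := by
            simp [pvSelIdx, hz]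
          have hseln : pvSelIdx (fun s => decide (s < 0)) (Size[i] :: Size.drop (i+1)) i
              = pvSelIdx (fun s => decide (s < 0)) (Size.drop (i+1)) (i+1) := by
            simp [pvSelIdx, hz]
          rw [hselp, hseln]
          exact ih (i+1) (by omega) ic ip inf oc op outf h1 h2 h3 h4

-- ===== VERDICT (by name: the statement is the Claim_ definition above) =====
theorem save_intI_spec : Claim_equal_save_intI := by
  intro Size _
  unfold Spec_save_intI save_intI save_intI_alt
  rw [save_intI_loop_spec Size Size.length 0 (by omega) 0 0 [] 0 0 [] (by omega) (by omega) (by omega) (by omega)]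
  have hp : (((PySem.List.enumerate Size 0).filter (fun p => p.2 > 0)).map (fun p => p.1))
      = pvSelIdx (fun s => decide (0 < s)) Size 0 := pvSelIdx_enumerate (fun s => decide (0 < s)) Size 0
  have hn : (((PySem.List.enumerate Size 0).filter (fun p => p.2 < 0)).map (fun p => p.1))
      = pvSelIdx (fun s => decide (s < 0)) Size 0 := pvSelIdx_enumerate (fun s => decide (s < 0)) Size 0
  have h300 : (300:Int).toNat = 300 := rfl
  simp only [List.drop_zero, Nat.cast_zero, Int.sub_zero, Int.zero_add, h300, hp, hn]
  rw [pvPad_foldl, pvPad_foldl, PySem.List.length_pyRange_one, PySem.List.length_pyRange_one]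
  have hin : ((pvSelIdx (fun s => decide (s < 0)) Size 0).take 300).length ≤ 300 :=
    le_trans (List.length_take_le _ _) (le_refl _)
  have hout : ((pvSelIdx (fun s => decide (0 < s)) Size 0).take 300).length ≤ 300 :=
    le_trans (List.length_take_le _ _) (le_refl _)
  have h2 : ((300:Int) - (((pvSelIdx (fun s => decide (s < 0)) Size 0).take 300).length : Int)).toNat
      = 300 - ((pvSelIdx (fun s => decide (s < 0)) Size 0).take 300).length := by omega
  have h3 : ((300:Int) - (((pvSelIdx (fun s => decide (0 < s)) Size 0).take 300).length : Int)).toNat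
      = 300 - ((pvSelIdx (fun s => decide (0 < s)) Size 0).take 300).length := by omega
  rw [h2, h3]
  simp [List.append_assoc]
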